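-- pv_equiv track=rewrite | github.com/jrached/6.0001 | Pset2/1_ps2/hangman.py | get_word_progress
-- ===== SOURCE A (Python) =====
-- def get_word_progress(secret_word, letters_guessed):
--     '''
--     secret_word: string, the lowercase word the user is guessing
--     letters_guessed: list (of lowercase letters), the letters that have been
--         guessed so far
--
--     returns: string, comprised of letters and asterisks (*) that represents
--         which letters in secret_word have not been guessed so far
--     '''
--     # FILL IN YOUR CODE HERE AND DELETE "pass"
--     progress = ""
--
--     for i in range(len(secret_word)):
--         if secret_word[i] in letters_guessed:
--             reveal = secret_word[i]
--         else:
--             reveal = "*"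
--         progress += reveal
--
--     return progress
-- ===== SOURCE B (Python) =====
-- def get_word_progress(secret_word, letters_guessed):
--     buffer = ['*'] * len(secret_word)
--     for g in letters_guessed:
--         for i, c in enumerate(secret_word):
--             if c == g:
--                 buffer[i] = c
--     return ''.join(buffer)
-- ===== Notes on version B (the rewrite author's own statement) =====
-- stated objective: alternative
-- what changed: Inverted the loop nesting: instead of scanning the word and testing per-character membership in the guess list, B initialises a '*' buffer and, looping over each guess, writes it into every matching position, joining the buffer at the end.
import Mathlib
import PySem

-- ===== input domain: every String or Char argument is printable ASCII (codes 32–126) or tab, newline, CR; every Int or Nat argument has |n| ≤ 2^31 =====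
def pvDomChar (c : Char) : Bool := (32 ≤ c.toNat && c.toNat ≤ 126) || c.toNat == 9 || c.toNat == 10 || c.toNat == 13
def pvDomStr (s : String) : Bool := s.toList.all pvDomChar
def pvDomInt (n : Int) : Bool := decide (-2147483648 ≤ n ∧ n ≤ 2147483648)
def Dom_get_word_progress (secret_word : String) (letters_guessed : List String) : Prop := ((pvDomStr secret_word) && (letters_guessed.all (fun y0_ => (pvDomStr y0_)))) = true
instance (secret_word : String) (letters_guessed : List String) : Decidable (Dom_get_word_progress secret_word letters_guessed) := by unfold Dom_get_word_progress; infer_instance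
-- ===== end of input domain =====

-- B inverts the loop nesting (outer over guesses, positional writes into a '*' buffer); same cost, no speed claim.

-- ===== PORT A =====
def get_word_progress (secret_word : String) (letters_guessed : List String) : String :=
  String.ofList <|
    (PySem.List.pyRange 0 (secret_word.toList.length : Int) 1).foldl
      (fun progress i =>
        let c := PySem.List.pyGetD secret_word.toList i '*'
        let reveal := if letters_guessed.contains (String.ofList [c]) then [c] else ['*']
        progress ++ reveal) []

-- ===== PORT B =====
def get_word_progress_alt (secret_word : String) (letters_guessed : List String) : String :=
  String.ofList <|
    letters_guessed.foldl
      (fun buffer g =>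
        (PySem.List.enumerate secret_word.toList 0).foldl
          (fun b p => if String.ofList [p.2] == g then PySem.List.pySetD b p.1 p.2 else b)
          buffer)
      (List.replicate secret_word.toList.length '*')

-- ===== PRECONDITION & SPEC =====
def Spec_get_word_progress (secret_word : String) (letters_guessed : List String) (out : String) : Prop := out = get_word_progress_alt secret_word letters_guessed
instance (secret_word : String) (letters_guessed : List String) (out : String) : Decidable (Spec_get_word_progress secret_word letters_guessed out) := by unfold Spec_get_word_progress; infer_instance

-- ===== CLAIM (what is proved, stated in full; the proofs are below) =====
def Claim_equal_get_word_progress : Prop := ∀ (secret_word : String) (letters_guessed : List String), Dom_get_word_progress secret_word letters_guessed → Spec_get_word_progress secret_word letters_guessed (get_word_progress secret_word letters_guessed)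

-- ===== LEMMAS AND PROOFS =====

-- A's loop is a map over the word's characters.
lemma getwp_A_eq_map (w : String) (ls : List String) :
    get_word_progress w ls =
      String.ofList (w.toList.map (fun c => if ls.contains (String.ofList [c]) then c else '*')) := by
  unfold get_word_progress
  rw [PySem.List.foldl_pyRange_zero_pyGetD' w.toList '*'
        (fun progress c => progress ++ if ls.contains (String.ofList [c]) then [c] else ['*']) []]
  congr 1
  have hfun : (fun (progress : List Char) (c : Char) =>
      progress ++ if ls.contains (String.ofList [c]) then [c] else ['*'])
      = fun progress c => progress ++ [if ls.contains (String.ofList [c]) then c else '*'] := by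
    funext progress c
    by_cases h : String.ofList [c] ∈ ls <;> simp [h]
  rw [hfun, PySem.List.foldl_append_singleton_eq_map, List.nil_append]

-- B's inner loop (one guess g) rewrites exactly the positions whose character equals g.
lemma getwp_inner (g : String) (cs : List Char) (pre : List Char) (h : Char → Char) :
    (PySem.List.enumerate cs (pre.length : Int)).foldl
        (fun b p => if String.ofList [p.2] == g then PySem.List.pySetD b p.1 p.2 else b)
        (pre ++ cs.map h)
      = pre ++ cs.map (fun c => if String.ofList [c] == g then c else h c) := by
  induction cs generalizing pre with
  | nil => simp [PySem.List.enumerate_nil]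
  | cons c cs ih =>
    rw [PySem.List.enumerate_cons]
    simp only [List.foldl_cons, List.map_cons]
    by_cases hc : String.ofList [c] == g
    · have hset : PySem.List.pySetD (pre ++ h c :: cs.map h) ((pre.length : Nat) : Int) c
          = (pre ++ [c]) ++ cs.map h := by
        rw [PySem.List.pySetD_natCast]; simp
      have hlen : ((pre.length : Int) + 1) = (((pre ++ [c]).length : Nat) : Int) := by
        simp
      rw [hc]; simp only [if_true]
      rw [hset, hlen, ih (pre ++ [c])]
      simp
    · rw [if_neg (by simpa using hc)]
      have hlen : ((pre.length : Int) + 1) = (((pre ++ [h c]).length : Nat) : Int) := by simp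
      have : pre ++ h c :: cs.map h = (pre ++ [h c]) ++ cs.map h := by simp
      rw [this, hlen, ih (pre ++ [h c])]
      simp [hc]

-- B's outer loop accumulates the per-character membership test.
lemma getwp_outer (ls : List String) (cs : List Char) (h : Char → Char) :
    ls.foldl
        (fun buffer g =>
          (PySem.List.enumerate cs 0).foldl
            (fun b p => if String.ofList [p.2] == g then PySem.List.pySetD b p.1 p.2 else b)
            buffer)
        (cs.map h)
      = cs.map (fun c => if ls.contains (String.ofList [c]) then c else h c) := by
  induction ls generalizing h with
  | nil => simp
  | cons g ls ih =>
    simp only [List.foldl_cons]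
    have hin := getwp_inner g cs [] h
    simp only [List.length_nil, Nat.cast_zero, List.nil_append] at hin
    rw [hin, ih (fun c => if String.ofList [c] == g then c else h c)]
    apply List.map_congr_left
    intro c _
    by_cases h1 : String.ofList [c] = g <;> by_cases h2 : String.ofList [c] ∈ ls <;>
      simp [h1, h2]

-- ===== VERDICT (by name: the statement is the Claim_ definition above) =====
theorem get_word_progress_spec : Claim_equal_get_word_progress := by
  intro w ls _
  unfold Spec_get_word_progress get_word_progress_alt
  rw [getwp_A_eq_map]
  have hrep : List.replicate w.toList.length '*' = w.toList.map (fun _ => '*') := by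
    simp [List.map_const']
  rw [hrep, getwp_outer]
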